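-- pv_equiv track=rewrite | github.com/dishaai14/605-Milestone1-Vansh-and-Disha | src/validation.py | validate_no_split_leakage
-- ===== SOURCE A (Python) =====
-- from typing import List, Dict, Any
--
-- def validate_no_split_leakage(splits: Dict[str, List]) -> List[str]:
--     errors = []
--     sets = {k: set(v) for k, v in splits.items()}
--     split_names = list(sets.keys())
--     for i in range(len(split_names)):
--         for j in range(i + 1, len(split_names)):
--             overlap = sets[split_names[i]] & sets[split_names[j]]
--             if overlap:
--                 errors.append(f"Leakage between {split_names[i]} and {split_names[j]}: {len(overlap)} identities")
--     return errors
-- ===== SOURCE B (Python) =====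
-- def validate_no_split_leakage(splits):
--     # Inverted index: identity -> list of the split names containing it (in split
--     # order); then tally every ordered pair of splits sharing an identity once per
--     # identity, and emit the messages by reading the tally — no per-pair set work.
--     members = {}
--     for name, vals in splits.items():
--         for x in vals:
--             ps = members.setdefault(x, [])
--             if not ps or ps[-1] != name:
--                 ps.append(name)
--     pair_counts = {}
--     for ps in members.values():
--         while ps:
--             u, ps = ps[0], ps[1:]
--             for v in ps:
--                 pair_counts[(u, v)] = pair_counts.get((u, v), 0) + 1
--     names = list(splits)
--     errors = []
--     for i in range(len(names)):
--         for j in range(i + 1, len(names)):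
--             c = pair_counts.get((names[i], names[j]), 0)
--             if c:
--                 errors.append(f"Leakage between {names[i]} and {names[j]}: {c} identities")
--     return errors
-- ===== Notes on version B (the rewrite author's own statement) =====
-- stated objective: alternative
-- what changed: Replaces A's per-pair set intersections by an inverted index (identity -> ordered list of split names) built in one pass; each identity then increments a counter for every ordered pair of splits containing it, and the messages are emitted by reading that counter over the same ordered pairs.
import Mathlib
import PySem

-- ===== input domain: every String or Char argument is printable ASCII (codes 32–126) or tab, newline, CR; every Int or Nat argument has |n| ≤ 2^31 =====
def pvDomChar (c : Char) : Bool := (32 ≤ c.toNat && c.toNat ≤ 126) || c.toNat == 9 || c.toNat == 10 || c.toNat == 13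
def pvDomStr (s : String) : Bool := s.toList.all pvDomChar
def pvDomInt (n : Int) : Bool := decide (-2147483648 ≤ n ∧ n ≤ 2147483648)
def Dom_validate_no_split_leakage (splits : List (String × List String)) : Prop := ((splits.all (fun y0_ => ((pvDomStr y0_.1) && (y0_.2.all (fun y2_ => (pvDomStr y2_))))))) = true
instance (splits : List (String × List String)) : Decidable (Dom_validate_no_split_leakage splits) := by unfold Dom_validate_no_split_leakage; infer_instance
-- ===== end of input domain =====

-- B replaces A's per-pair set intersections by an inverted index (identity -> list of
-- split names) built in one pass, tallying ordered split pairs per shared identity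
-- (objective: alternative decomposition; no per-pair set work).

-- Shared modelling of the dict[str, list[str]] ARGUMENT: the association list stands
-- for a Python dict, first binding of a key wins (exact for how the harness builds the dict).
def pyNormalize (splits : List (String × List String)) : PySem.Dict String (List String) :=
  splits.foldl (fun d p => d.setdefault p.1 p.2) PySem.Dict.empty

-- The f-string both Pythons share: f"Leakage between {a} and {b}: {c} identities"
-- (built on List Char; PySem.Int.toStr = str(c)).
def leakMsg (a b : String) (c : Int) : String :=
  String.ofList ("Leakage between ".toList ++ a.toList ++ " and ".toList ++ b.toList
    ++ ": ".toList ++ (PySem.Int.toStr c).toList ++ " identities".toList)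

-- ===== PORT A =====
-- sets = {k: set(v) for k, v in splits.items()}; nested index loops over the key list;
-- sets[names[i]] never raises (names are exactly sets' keys), so getD ∅ is exact.
def validate_no_split_leakage (splits : List (String × List String)) : List String :=
  let d := pyNormalize splits
  let sets : PySem.Dict String (PySem.Set String) :=
    PySem.Dict.ofList (d.items.map (fun p => (p.1, PySem.Set.ofList p.2)))
  let names := sets.keys
  let n : Int := names.length
  (PySem.List.pyRange 0 n 1).foldl (fun errors i =>
    (PySem.List.pyRange (i + 1) n 1).foldl (fun errors j =>
      let ovl := PySem.Set.inter (sets.getD (PySem.List.pyGetD names i "") PySem.Set.empty)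
                                 (sets.getD (PySem.List.pyGetD names j "") PySem.Set.empty)
      if ovl.isEmpty = false then
        errors ++ [leakMsg (PySem.List.pyGetD names i "") (PySem.List.pyGetD names j "")
                           (PySem.Set.len ovl)]
      else errors)
      errors) []

-- ===== PORT B =====
-- B's tally loop: `while ps: u, ps = ps[0], ps[1:]; for v in ps: pair_counts[(u,v)] += 1`
-- (structural recursion on the shrinking list, exactly the while loop's state).
def pvIncPairs (d : PySem.Dict (String × String) Int) :
    List String → PySem.Dict (String × String) Int
  | [] => d
  | u :: rest =>
      pvIncPairs (rest.foldl (fun d v => d.insert (u, v) (d.getD (u, v) 0 + 1)) d) rest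

-- members.setdefault(x, []) then `if not ps or ps[-1] != name: ps.append(name)`
-- = insert x (if last is already the name then unchanged else appended);
-- pair_counts.get((names[i], names[j]), 0) = getD _ 0.
def validate_no_split_leakage_alt (splits : List (String × List String)) : List String :=
  let d := pyNormalize splits
  let members : PySem.Dict String (List String) :=
    d.items.foldl (fun m p =>
      p.2.foldl (fun m x =>
        let ps := m.getD x []
        m.insert x (if ps.getLast? = some p.1 then ps else ps ++ [p.1])) m)
      PySem.Dict.empty
  let pairCounts := members.values.foldl (fun d ps => pvIncPairs d ps) PySem.Dict.empty
  let names := d.keys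
  let n : Int := names.length
  (PySem.List.pyRange 0 n 1).foldl (fun errors i =>
    (PySem.List.pyRange (i + 1) n 1).foldl (fun errors j =>
      let c : Int := pairCounts.getD (PySem.List.pyGetD names i "", PySem.List.pyGetD names j "") 0
      if c ≠ 0 then
        errors ++ [leakMsg (PySem.List.pyGetD names i "") (PySem.List.pyGetD names j "") c]
      else errors)
      errors) []

-- ===== PRECONDITION & SPEC =====
def Spec_validate_no_split_leakage (splits : List (String × List String)) (out : List String) : Prop := out = validate_no_split_leakage_alt splits
instance (splits : List (String × List String)) (out : List String) : Decidable (Spec_validate_no_split_leakage splits out) := by unfold Spec_validate_no_split_leakage; infer_instance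

-- ===== CLAIM (what is proved, stated in full; the proofs are below) =====
def Claim_equal_validate_no_split_leakage : Prop := ∀ (splits : List (String × List String)), Dom_validate_no_split_leakage splits → Spec_validate_no_split_leakage splits (validate_no_split_leakage splits)

-- ===== LEMMAS AND PROOFS =====

-- proof-side names for B's building blocks
def pvPush (l : List String) (nm : String) : List String :=
  if l.getLast? = some nm then l else l ++ [nm]

theorem pv_push_def (l : List String) (nm : String) :
    (if l.getLast? = some nm then l else l ++ [nm]) = pvPush l nm := rfl

theorem pv_push_idem (l : List String) (nm : String) :
    pvPush (pvPush l nm) nm = pvPush l nm := by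
  unfold pvPush
  by_cases h : l.getLast? = some nm
  · simp [h]
  · simp [h]

def pvPairs : List String → List (String × String)
  | [] => []
  | u :: rest => rest.map (fun v => (u, v)) ++ pvPairs rest

-- the per-split inner loop of B's index builder, at one lookup point
theorem pv_inner_getD (vals : List String) (nm y : String)
    (m : PySem.Dict String (List String)) :
    (vals.foldl (fun m x =>
        m.insert x (if (m.getD x []).getLast? = some nm then m.getD x []
                    else m.getD x [] ++ [nm])) m).getD y []
      = if y ∈ vals then pvPush (m.getD y []) nm else m.getD y [] := by
  induction vals generalizing m with
  | nil => simp
  | cons x xs ih =>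
      simp only [List.foldl_cons]
      rw [ih]
      simp only [pv_push_def]
      by_cases hyx : y = x
      · subst hyx
        by_cases hmem : y ∈ xs
        · simp [hmem, pv_push_idem]
        · simp [hmem]
      · by_cases hmem : y ∈ xs
        · simp [hmem, hyx, PySem.Dict.getD_insert]
        · simp [hmem, hyx, PySem.Dict.getD_insert]

-- the whole index builder, at one lookup point, as a plain list fold
theorem pv_outer_getD (L : List (String × List String))
    (m : PySem.Dict String (List String)) (y : String) :
    (L.foldl (fun m p =>
        p.2.foldl (fun m x =>
          m.insert x (if (m.getD x []).getLast? = some p.1 then m.getD x []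
                      else m.getD x [] ++ [p.1])) m) m).getD y []
      = L.foldl (fun acc p => if y ∈ p.2 then pvPush acc p.1 else acc) (m.getD y []) := by
  induction L generalizing m with
  | nil => simp
  | cons p ps ih =>
      simp only [List.foldl_cons]
      rw [ih, pv_inner_getD]

-- a pvPush fold over distinct names never re-appends: it is filter-then-map
theorem pv_push_fold (y : String) (L : List (String × List String)) (acc : List String)
    (hnd : (L.map Prod.fst).Nodup) (hlast : ∀ p ∈ L, acc.getLast? ≠ some p.1) :
    L.foldl (fun acc p => if y ∈ p.2 then pvPush acc p.1 else acc) acc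
      = acc ++ (L.filter (fun p => decide (y ∈ p.2))).map Prod.fst := by
  induction L generalizing acc with
  | nil => simp
  | cons p ps ih =>
      simp only [List.map_cons, List.nodup_cons] at hnd
      simp only [List.foldl_cons, List.filter_cons]
      by_cases hy : y ∈ p.2
      · rw [if_pos hy, if_pos (by simpa using hy)]
        have hstep : pvPush acc p.1 = acc ++ [p.1] := by
          unfold pvPush
          rw [if_neg (hlast p List.mem_cons_self)]
        have hlast' : ∀ q ∈ ps, (acc ++ [p.1]).getLast? ≠ some q.1 := by
          intro q hq
          rw [List.getLast?_concat]
          intro hc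
          have hcc : p.1 = q.1 := by simpa using hc
          exact hnd.1 (by rw [hcc]; exact List.mem_map_of_mem hq)
        rw [hstep, ih (acc ++ [p.1]) hnd.2 hlast']
        simp
      · rw [if_neg hy, if_neg (by simpa using hy)]
        exact ih acc hnd.2 (fun q hq => hlast q (List.mem_cons_of_mem _ hq))

-- keys of B's inverted index
theorem pv_memb_keys (L : List (String × List String))
    (m : PySem.Dict String (List String)) :
    (L.foldl (fun m p =>
        p.2.foldl (fun m x =>
          m.insert x (if (m.getD x []).getLast? = some p.1 then m.getD x []
                      else m.getD x [] ++ [p.1])) m) m).keys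
      = PySem.Set.update m.keys (L.flatMap (fun p => p.2)) := by
  induction L generalizing m with
  | nil => simp [PySem.Set.update]
  | cons p ps ih =>
      simp only [List.foldl_cons]
      rw [ih, PySem.Dict.keys_foldl_insert]
      simp [PySem.Set.update, List.foldl_append]

-- a Nodup key list pins the value associated with a key
theorem pv_assoc_unique {L : List (String × List String)}
    (h : (L.map Prod.fst).Nodup) {a : String} {va vb : List String}
    (h1 : (a, va) ∈ L) (h2 : (a, vb) ∈ L) : va = vb := by
  induction L with
  | nil => cases h1
  | cons q qs ih =>
      simp only [List.map_cons, List.nodup_cons] at h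
      rcases List.mem_cons.1 h1 with h1 | h1 <;> rcases List.mem_cons.1 h2 with h2 | h2
      · exact (Prod.ext_iff.1 (h1.trans h2.symm)).2
      · exact absurd (List.mem_map_of_mem h2) (h1 ▸ h.1)
      · exact absurd (List.mem_map_of_mem h1) (h2 ▸ h.1)
      · exact ih h.2 h1 h2

-- a Nodup list is strictly increasing under its own idxOf
theorem pv_nodup_pairwise_idxOf (l : List String) (h : l.Nodup) :
    l.Pairwise (fun u v => l.idxOf u < l.idxOf v) := by
  rw [List.pairwise_iff_getElem]
  intro p q hp hq hpq
  rw [List.Nodup.idxOf_getElem h p hp, List.Nodup.idxOf_getElem h q hq]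
  exact hpq

-- counting one ordered pair in pvPairs of an ord-increasing list
theorem pv_count_pairs (ord : String → Nat) (ps : List String)
    (hps : ps.Pairwise (fun u v => ord u < ord v)) (na nb : String)
    (hord : ord na < ord nb) :
    (pvPairs ps).count (na, nb) = if na ∈ ps ∧ nb ∈ ps then 1 else 0 := by
  induction ps with
  | nil => simp [pvPairs]
  | cons x xs ih =>
      rcases List.pairwise_cons.1 hps with ⟨hx, hxs⟩
      have hnd : xs.Nodup :=
        (hxs.imp (fun {u v} huv => fun heq => absurd (heq ▸ huv) (lt_irrefl _)))
      simp only [pvPairs, List.count_append]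
      rw [List.count_eq_countP, List.countP_map, ih hxs]
      by_cases hna : na = x
      · subst hna
        have hnain : na ∉ xs := fun hmem => absurd (hx na hmem) (by omega)
        have hmapcnt : xs.countP ((fun a => a == (na, nb)) ∘ fun v => (na, v))
            = xs.count nb := by
          rw [List.count_eq_countP]
          apply List.countP_congr
          intro v _
          simp
        rw [hmapcnt]
        by_cases hnb : nb ∈ xs
        · simp [List.count_eq_one_of_mem hnd hnb, hnain, hnb]
        · have hnbx : ¬ nb = na := fun hh => by rw [hh] at hord; omega
          simp [List.count_eq_zero.mpr hnb, hnain, hnb, hnbx]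
      · have hzero : xs.countP ((fun a => a == (na, nb)) ∘ fun v => (x, v)) = 0 := by
          apply List.countP_eq_zero.2
          intro v _
          have : ¬ (x, v) = (na, nb) := fun hh => hna ((Prod.ext_iff.1 hh).1).symm
          simpa using this
        rw [hzero]
        by_cases hnb : nb = x
        · subst hnb
          have hnone : na ∉ xs := fun hmem => absurd (hx na hmem) (by omega)
          have hnbxs : nb ∉ xs := fun hmem => absurd (hx nb hmem) (by omega)
          have hnanb : ¬ na = nb := fun hh => by rw [hh] at hord; omega
          simp [hna, hnone, hnbxs]
        · simp [List.mem_cons, hna, hnb]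

-- B's while-loop tally is a fold over the explicit pair list
theorem pv_incPairs_eq (ps : List String) (d : PySem.Dict (String × String) Int) :
    pvIncPairs d ps
      = (pvPairs ps).foldl (fun d k => d.insert k (d.getD k 0 + 1)) d := by
  induction ps generalizing d with
  | nil => rfl
  | cons u rest ih =>
      show pvIncPairs (rest.foldl (fun d v => d.insert (u, v) (d.getD (u, v) 0 + 1)) d) rest = _
      rw [ih]
      simp only [pvPairs, List.foldl_append, List.foldl_map]

-- the tally over all index values is a single counter fold
theorem pv_fold_values (vs : List (List String)) (d : PySem.Dict (String × String) Int) :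
    vs.foldl (fun d ps => pvIncPairs d ps) d
      = (vs.flatMap pvPairs).foldl (fun d k => d.insert k (d.getD k 0 + 1)) d := by
  induction vs generalizing d with
  | nil => rfl
  | cons ps rest ih =>
      rw [List.foldl_cons, List.flatMap_cons, List.foldl_append, pv_incPairs_eq]
      exact ih _

-- counting the pair across all values = counting the splits that contain both
theorem pv_flat_count (vs : List (List String)) (ord : String → Nat)
    (hvs : ∀ ps ∈ vs, ps.Pairwise (fun u v => ord u < ord v)) (na nb : String)
    (hord : ord na < ord nb) :
    (vs.flatMap pvPairs).count (na, nb)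
      = vs.countP (fun ps => decide (na ∈ ps) && decide (nb ∈ ps)) := by
  induction vs with
  | nil => rfl
  | cons ps rest ih =>
      simp only [List.flatMap_cons, List.count_append, List.countP_cons]
      rw [ih (fun q hq => hvs q (List.mem_cons_of_mem _ hq)),
        pv_count_pairs ord ps (hvs ps List.mem_cons_self) na nb hord]
      by_cases h1 : na ∈ ps <;> by_cases h2 : nb ∈ ps <;> simp [h1, h2] <;> omega

-- pyNormalize produces a dict with Nodup keys
theorem pv_norm_aux (L : List (String × List String)) (d : PySem.Dict String (List String))
    (h : d.keys.Nodup) : (L.foldl (fun d p => d.setdefault p.1 p.2) d).keys.Nodup := by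
  induction L generalizing d with
  | nil => exact h
  | cons p ps ih =>
      simp only [List.foldl_cons]
      apply ih
      rw [PySem.Dict.keys_setdefault]
      by_cases hc : d.contains p.1 = true
      · simp [hc, h]
      · have hnotin : p.1 ∉ d.keys := fun hm => hc ((PySem.Dict.contains_iff_mem_keys d p.1).2 hm)
        rw [if_neg hc]
        simp [List.nodup_append, h]
        exact fun a ha hap => hnotin (hap ▸ ha)

theorem pv_norm_keys_nodup (splits : List (String × List String)) :
    (pyNormalize splits).keys.Nodup :=
  pv_norm_aux splits PySem.Dict.empty PySem.Dict.nodup_keys_empty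

-- on A's side: items of the comprehension dict `sets`
theorem pv_sets_items (L : List (String × List String)) (hnd : (L.map Prod.fst).Nodup) :
    (PySem.Dict.ofList (L.map (fun p => (p.1, PySem.Set.ofList p.2)))).items
      = L.map (fun p => (p.1, PySem.Set.ofList p.2)) := by
  have h := PySem.Dict.items_foldl_insert_fresh (L.map (fun p => (p.1, PySem.Set.ofList p.2)))
    Prod.fst Prod.snd PySem.Dict.empty
    (fun a _ => PySem.Dict.contains_empty a.1)
    (by simpa [List.map_map, Function.comp] using hnd)
  have : PySem.Dict.ofList (L.map (fun p => (p.1, PySem.Set.ofList p.2)))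
      = (L.map (fun p => (p.1, PySem.Set.ofList p.2))).foldl (fun d a => d.insert a.1 a.2)
          PySem.Dict.empty := rfl
  rw [this]
  simpa using h

-- the central per-pair identity: B's tally = the size of A's intersection
theorem pv_pair_value (L : List (String × List String)) (hnd : (L.map Prod.fst).Nodup)
    {na nb : String} {va vb : List String} (ha : (na, va) ∈ L) (hb : (nb, vb) ∈ L)
    (hord : (L.map Prod.fst).idxOf na < (L.map Prod.fst).idxOf nb) :
    ((L.foldl (fun m p =>
        p.2.foldl (fun m x =>
          m.insert x (if (m.getD x []).getLast? = some p.1 then m.getD x []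
                      else m.getD x [] ++ [p.1])) m)
        PySem.Dict.empty).values.foldl (fun d ps => pvIncPairs d ps)
          PySem.Dict.empty).getD (na, nb) 0
      = PySem.Set.len (PySem.Set.inter (PySem.Set.ofList va) (PySem.Set.ofList vb)) := by
  set names := L.map Prod.fst with hnames
  set ord : String → Nat := fun s => names.idxOf s with hord_def
  set M := L.foldl (fun m p =>
      p.2.foldl (fun m x =>
        m.insert x (if (m.getD x []).getLast? = some p.1 then m.getD x []
                    else m.getD x [] ++ [p.1])) m)
      (PySem.Dict.empty : PySem.Dict String (List String)) with hM
  have hkeys : M.keys = PySem.Set.ofList (L.flatMap (fun p => p.2)) := by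
    rw [hM, pv_memb_keys]; rfl
  have hkn : M.keys.Nodup := by rw [hkeys]; exact PySem.Set.nodup_ofList _
  have hgetD : ∀ y, M.getD y [] = (L.filter (fun p => decide (y ∈ p.2))).map Prod.fst := by
    intro y
    rw [hM, pv_outer_getD, PySem.Dict.getD_empty]
    exact pv_push_fold y L [] hnd (by intro p _; simp)
  have hpair : ∀ y, (M.getD y []).Pairwise (fun u v => ord u < ord v) := by
    intro y
    rw [hgetD y]
    exact List.Pairwise.sublist (List.filter_sublist.map Prod.fst)
      (pv_nodup_pairwise_idxOf names hnd)
  have hmemv : ∀ (nm : String) (v : List String), (nm, v) ∈ L → ∀ y,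
      (nm ∈ M.getD y [] ↔ y ∈ v) := by
    intro nm v hv y
    rw [hgetD y]
    constructor
    · intro hmem
      rcases List.mem_map.1 hmem with ⟨p, hp, rfl⟩
      rcases List.mem_filter.1 hp with ⟨hpL, hyp⟩
      have hp' : (p.1, p.2) ∈ L := by cases p; exact hpL
      rw [pv_assoc_unique hnd hv hp']
      simpa using hyp
    · intro hy
      exact List.mem_map_of_mem (List.mem_filter.2 ⟨hv, by simpa using hy⟩)
  -- tally = counter over the flattened pair lists
  rw [pv_fold_values, PySem.Dict.getD_foldl_insert_add_one, PySem.Dict.getD_empty]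
  have hordlt : ord na < ord nb := hord
  rw [pv_flat_count M.values ord
        (by
          intro ps hps
          rcases List.mem_iff_getElem.1
            (by rw [PySem.Dict.values_eq_map_keys M hkn []] at hps; exact hps) with ⟨k, hk, hfk⟩
          rw [PySem.Dict.values_eq_map_keys M hkn []] at hps
          rcases List.mem_map.1 hps with ⟨y, _, rfl⟩
          exact hpair y)
        na nb hordlt]
  -- countP over values = countP over keys of the membership predicate
  rw [PySem.Dict.values_eq_map_keys M hkn [], List.countP_map]
  have hcountP :
      M.keys.countP ((fun ps => decide (na ∈ ps) && decide (nb ∈ ps)) ∘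
          fun k => M.getD k [])
        = M.keys.countP (fun y => decide (y ∈ va) && decide (y ∈ vb)) := by
    apply List.countP_congr
    intro y _
    simp only [Function.comp, Bool.and_eq_true, decide_eq_true_eq]
    rw [hmemv na va ha y, hmemv nb vb hb y]
  rw [hcountP, List.countP_eq_length_filter]
  have hperm : List.Perm (M.keys.filter (fun y => decide (y ∈ va) && decide (y ∈ vb)))
      (PySem.Set.inter (PySem.Set.ofList va) (PySem.Set.ofList vb)) := by
    rw [List.perm_ext_iff_of_nodup (hkn.filter _)
      (PySem.Set.nodup_inter _ _ (PySem.Set.nodup_ofList _))]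
    intro y
    rw [List.mem_filter, PySem.Set.mem_inter, PySem.Set.mem_ofList, PySem.Set.mem_ofList]
    constructor
    · rintro ⟨-, hy⟩; simpa using hy
    · rintro ⟨hya, hyb⟩
      refine ⟨?_, by simp [hya, hyb]⟩
      rw [hkeys, PySem.Set.mem_ofList, List.mem_flatMap]
      exact ⟨(na, va), ha, hya⟩
  rw [hperm.length_eq, zero_add]
  rfl

theorem pv_main (splits : List (String × List String)) :
    validate_no_split_leakage splits = validate_no_split_leakage_alt splits := by
  unfold validate_no_split_leakage validate_no_split_leakage_alt
  dsimp only
  set d := pyNormalize splits with hd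
  set L := d.items with hL
  have hnd : (L.map Prod.fst).Nodup := pv_norm_keys_nodup splits
  set sets := PySem.Dict.ofList (L.map (fun p => (p.1, PySem.Set.ofList p.2))) with hsets
  have hitems : sets.items = L.map (fun p => (p.1, PySem.Set.ofList p.2)) :=
    pv_sets_items L hnd
  have hskeys : sets.keys = d.keys := by
    show sets.items.map Prod.fst = L.map Prod.fst
    rw [hitems, List.map_map]; rfl
  have hsknd : sets.keys.Nodup := by rw [hskeys]; exact hnd
  have hgetD : ∀ {a : String} {va : List String}, (a, va) ∈ L →
      sets.getD a PySem.Set.empty = PySem.Set.ofList va := by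
    intro a va hmemL
    exact PySem.Dict.getD_of_mem_items sets
      (by rw [hitems]; exact List.mem_map_of_mem hmemL) hsknd PySem.Set.empty
  rw [hskeys]
  set names := d.keys with hnames
  have hnkeys : names = L.map Prod.fst := rfl
  have hname_pair : ∀ (k : Nat) (hk : k < names.length),
      ∃ va, (names[k]'hk, va) ∈ L ∧
        sets.getD (names[k]'hk) PySem.Set.empty = PySem.Set.ofList va := by
    intro k hk
    have hk' : k < L.length := by
      simpa [hnames, PySem.Dict.keys, hL] using hk
    refine ⟨(L[k]'hk').2, ?_, ?_⟩
    · have : names[k]'hk = (L[k]'hk').1 := by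
        show (L.map Prod.fst)[k]'(by simpa using hk') = _
        simp
      rw [this]
      exact (Prod.mk.eta (p := L[k]'hk')) ▸ List.getElem_mem hk'
    · apply hgetD
      have : names[k]'hk = (L[k]'hk').1 := by
        show (L.map Prod.fst)[k]'(by simpa using hk') = _
        simp
      rw [this]
      exact (Prod.mk.eta (p := L[k]'hk')) ▸ List.getElem_mem hk'
  apply PySem.List.foldl_congr_mem
  intro errors i hi
  apply PySem.List.foldl_congr_mem
  intro acc j hj
  rw [PySem.List.mem_pyRange_one] at hi hj
  have hi0 : 0 ≤ i := hi.1
  have hin : i < (names.length : Int) := hi.2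
  have hj0 : 0 ≤ j := le_trans (by omega) hj.1
  have hjn : j < (names.length : Int) := hj.2
  rw [PySem.List.pyGetD_eq_getElem names "" hi0 hin,
      PySem.List.pyGetD_eq_getElem names "" hj0 hjn]
  have hiN : i.toNat < names.length := by omega
  have hjN : j.toNat < names.length := by omega
  obtain ⟨va, hva, hgi⟩ := hname_pair i.toNat hiN
  obtain ⟨vb, hvb, hgj⟩ := hname_pair j.toNat hjN
  rw [hgi, hgj]
  have hnnd : names.Nodup := by rw [hnkeys]; exact hnd
  have hord : (L.map Prod.fst).idxOf (names[i.toNat]'hiN)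
      < (L.map Prod.fst).idxOf (names[j.toNat]'hjN) := by
    rw [← hnkeys, List.Nodup.idxOf_getElem hnnd i.toNat hiN,
      List.Nodup.idxOf_getElem hnnd j.toNat hjN]
    omega
  rw [pv_pair_value L hnd hva hvb hord]
  set ovl := PySem.Set.inter (PySem.Set.ofList va) (PySem.Set.ofList vb) with hovl
  by_cases hvide : ovl.isEmpty = true
  · have h0 : ovl.length = 0 := by simpa [List.isEmpty_iff_length_eq_zero] using hvide
    simp [hvide, h0]
  · have h0 : ovl.length ≠ 0 := by
      simp only [List.isEmpty_iff_length_eq_zero] at hvide; exact hvide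
    have hnil : ovl ≠ [] := fun hh => h0 (by simp [hh])
    simp [eq_false_of_ne_true hvide, hnil]

-- ===== VERDICT (by name: the statement is the Claim_ definition above) =====
theorem validate_no_split_leakage_spec : Claim_equal_validate_no_split_leakage := by
  intro splits _
  unfold Spec_validate_no_split_leakage
  exact pv_main splits
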